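-- pv_equiv track=rewrite | github.com/savagelysubtle/multiagent-browser | mcp/server/ToolRack/Python/src/unified_mcp_server/tools/reasoning/sequential_thinking_tools.py | _calculate_max_depth
-- ===== SOURCE A (Python) =====
-- from typing import Any, Dict, List, Optional
--
-- def _calculate_max_depth(graph: Dict[str, Dict]) -> int:
--     """Calculate maximum depth of dependency chain."""
--
--     def get_depth(component: str, visited: set) -> int:
--         if component in visited:
--             return 0  # Circular dependency
--         visited.add(component)
--
--         if not graph[component]["depends_on"]:
--             return 1
--
--         max_child_depth = max(
--             get_depth(dep, visited.copy()) for dep in graph[component]["depends_on"]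
--         )
--         return 1 + max_child_depth
--
--     return max(get_depth(comp, set()) for comp in graph) if graph else 0
-- ===== SOURCE B (Python) =====
-- def _calculate_max_depth(graph):
--     """Calculate maximum depth of dependency chain (iterative DFS with explicit stack)."""
--     best = 0
--     stack = [(comp, frozenset()) for comp in graph]
--     while stack:
--         component, path = stack.pop()
--         new_path = path | {component}
--         if len(new_path) > best:
--             best = len(new_path)
--         for dep in graph[component]["depends_on"]:
--             if dep not in new_path:
--                 stack.append((dep, new_path))
--     return best
-- ===== Notes on version B (the rewrite author's own statement) =====
-- stated objective: alternative
-- what changed: Replaced the nested recursive get_depth (which returns a depth and takes a copied visited set per child) by an iterative DFS over an explicit stack of (component, path-set) states with a running best path length.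
import Mathlib
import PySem

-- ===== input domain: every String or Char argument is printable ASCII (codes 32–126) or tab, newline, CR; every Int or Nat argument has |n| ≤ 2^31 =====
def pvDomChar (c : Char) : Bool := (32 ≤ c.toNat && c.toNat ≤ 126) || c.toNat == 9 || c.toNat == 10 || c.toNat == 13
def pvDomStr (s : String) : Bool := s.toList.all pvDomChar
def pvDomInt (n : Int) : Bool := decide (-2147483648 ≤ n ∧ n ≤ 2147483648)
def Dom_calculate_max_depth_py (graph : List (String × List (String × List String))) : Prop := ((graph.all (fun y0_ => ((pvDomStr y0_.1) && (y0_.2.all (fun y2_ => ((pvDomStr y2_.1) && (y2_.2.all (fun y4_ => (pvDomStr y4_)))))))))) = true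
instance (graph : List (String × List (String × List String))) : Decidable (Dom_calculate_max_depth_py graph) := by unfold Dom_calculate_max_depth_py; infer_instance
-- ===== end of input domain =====

-- B replaces A's nested recursion (depth per node, copied visited set) by an iterative DFS over an
-- explicit stack of (component, path-set) states with a running best path length (objective: alternative).

-- dict lookup (first match = Python dict lookup; Python dicts have unique keys)
def pvLookup {α : Type} (l : List (String × α)) (k : String) : Option α :=
  (l.find? (fun p => p.1 == k)).map Prod.snd

-- graph[component]["depends_on"]; none = KeyError (excluded by Pre_)
def pvDeps (graph : List (String × List (String × List String))) (c : String) : Option (List String) :=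
  match pvLookup graph c with
  | none => none
  | some inner => pvLookup inner "depends_on"

-- the keys of graph a visited/path list has not yet consumed (termination measure of both ports)
def pvFree (graph : List (String × List (String × List String))) (visited : List String) : Nat :=
  ((graph.map Prod.fst).filter (fun k => !(visited.contains k))).length

-- generic filter-length monotonicity, used by the ports' termination proofs
theorem pv_len_filter_le {α : Type} (p q : α → Bool) (l : List α)
    (h : ∀ a ∈ l, q a = true → p a = true) :
    (l.filter q).length ≤ (l.filter p).length := by
  induction l with
  | nil => simp
  | cons a t ih =>
    have ht : ∀ b ∈ t, q b = true → p b = true := fun b hb => h b (List.mem_cons_of_mem _ hb)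
    by_cases hq : q a = true
    · have hp := h a (List.mem_cons_self ..) hq
      simp [hq, hp]
      exact ih ht
    · simp only [List.filter_cons, Bool.not_eq_true] at hq ⊢
      rw [hq]
      by_cases hp : p a = true
      · simp [hp]; exact Nat.le_succ_of_le (ih ht)
      · simp only [Bool.not_eq_true] at hp; rw [hp]; simpa using ih ht


theorem pv_len_filter_lt {α : Type} (p q : α → Bool) (l : List α) (c : α)
    (hc : c ∈ l) (hqc : q c = false) (hpc : p c = true)
    (h : ∀ a ∈ l, q a = true → p a = true) :
    (l.filter q).length < (l.filter p).length := by
  induction l with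
  | nil => cases hc
  | cons a t ih =>
    have ht : ∀ b ∈ t, q b = true → p b = true := fun b hb => h b (List.mem_cons_of_mem _ hb)
    rcases List.mem_cons.mp hc with rfl | hct
    · simp [hqc, hpc]
      exact pv_len_filter_le p q t ht
    · by_cases hq : q a = true
      · have hp := h a (List.mem_cons_self ..) hq
        simp [hq, hp]
        exact ih hct ht
      · simp only [List.filter_cons, Bool.not_eq_true] at hq ⊢
        rw [hq]
        by_cases hp : p a = true
        · simp [hp]; exact le_of_lt (ih hct ht)
        · simp only [Bool.not_eq_true] at hp; rw [hp]; simpa using ih hct ht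

theorem pvDeps_some_mem {graph : List (String × List (String × List String))} {c : String}
    {ds : List String} (h : pvDeps graph c = some ds) : c ∈ graph.map Prod.fst := by
  unfold pvDeps pvLookup at h
  cases hf : graph.find? (fun p => p.1 == c) with
  | none => rw [hf] at h; simp at h
  | some pr =>
    have hm := List.mem_of_find?_eq_some hf
    have hp := List.find?_some hf
    simp only [beq_iff_eq] at hp
    exact hp ▸ List.mem_map_of_mem hm

theorem pv_free_cons_lt {graph : List (String × List (String × List String))}
    {visited : List String} {c : String}
    (hc : c ∈ graph.map Prod.fst) (hv : c ∉ visited) :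
    pvFree graph (c :: visited) < pvFree graph visited := by
  unfold pvFree
  apply pv_len_filter_lt _ _ _ c hc
  · simp
  · simp [hv]
  · intro a _ ha
    simp only [Bool.not_eq_true', List.contains_eq_mem, decide_eq_false_iff_not,
      List.mem_cons, not_or] at ha ⊢
    exact ha.2

-- ===== PORT A =====
-- Transliteration of A: nested recursive get_depth; visited.add + visited.copy() per child becomes
-- passing (component :: visited) to each child.  max(generator) over the children is the running-max
-- loop maxChildA (Python's max over a nonempty sequence).  The '0' results on the pvDeps = none
-- branches stand for KeyError (excluded by Pre_).
mutual
def getDepthA (graph : List (String × List (String × List String)))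
    (visited : List String) (component : String) : Int :=
  if hv : component ∈ visited then 0
  else
    match hq : pvDeps graph component with
    | none => 0          -- Python: KeyError
    | some ds =>
      match ds with
      | [] => 1
      | d :: rest =>
        1 + maxChildA graph (component :: visited) rest
              (getDepthA graph (component :: visited) d)
termination_by (pvFree graph visited, 0)
decreasing_by
  all_goals exact Prod.Lex.left _ _ (pv_free_cons_lt (pvDeps_some_mem hq) hv)

def maxChildA (graph : List (String × List (String × List String)))
    (visited : List String) (ds : List String) (acc : Int) : Int :=
  match ds with
  | [] => acc
  | d :: rest => maxChildA graph visited rest (max acc (getDepthA graph visited d))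
termination_by (pvFree graph visited, ds.length + 1)
decreasing_by
  all_goals simp_wf
  all_goals exact Prod.Lex.right _ (by omega)
end

def calculate_max_depth_py (graph : List (String × List (String × List String))) : Int :=
  if graph.isEmpty then 0
  else
    match PySem.List.max? ((graph.map Prod.fst).map (fun comp => getDepthA graph [] comp)) (fun x => x) with
    | some m => m
    | none => 0   -- unreachable: graph nonempty

-- ===== PORT B =====
-- Transliteration of B (Source B): explicit stack of (component, path) states, running best.
-- The stack is kept top-first (Python pushes at the end and pops the last element), so the seed list
-- is reversed and children go on the front; fuel bounds the number of iterations of the while loop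
-- (pvFuel is shown sufficient under Pre_ in the proofs below).  best' is 'if len(new_path) > best'.
def pvS (graph : List (String × List (String × List String))) : Nat :=
  1 + (graph.map (fun p => (p.2.map (fun q => q.2.length)).sum)).sum

def pvFuel (graph : List (String × List (String × List String))) : Nat :=
  graph.length * (pvS graph + 1) ^ (graph.length + 1)

def loopB (graph : List (String × List (String × List String))) :
    Nat → Int → List (String × List String) → Int
  | 0, best, _ => best
  | Nat.succ _, best, [] => best
  | Nat.succ f, best, (component, path) :: rest =>
    let newPath := PySem.Set.add path component
    let best' := max best ((newPath.length : Int))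
    match pvDeps graph component with
    | none => loopB graph f best' rest    -- Python: KeyError here (excluded by Pre_)
    | some ds =>
      loopB graph f best'
        (((ds.filter (fun d => !(newPath.contains d))).map (fun d => (d, newPath))) ++ rest)

def calculate_max_depth_py_alt (graph : List (String × List (String × List String))) : Int :=
  loopB graph (pvFuel graph) 0 ((graph.map (fun p => (p.1, ([] : List String)))).reverse)

-- ===== PRECONDITION & SPEC =====
-- Pre_ excludes exactly the inputs on which Python A raises KeyError: some node without a
-- "depends_on" entry, or some listed dependency that is not a key of graph.
def Pre_calculate_max_depth_py (graph : List (String × List (String × List String))) : Prop :=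
  ∀ p ∈ graph, (∃ q ∈ p.2, q.1 = "depends_on") ∧
    (∀ q ∈ p.2, q.1 = "depends_on" → ∀ d ∈ q.2, d ∈ graph.map Prod.fst)

instance (graph : List (String × List (String × List String))) : Decidable (Pre_calculate_max_depth_py graph) := by unfold Pre_calculate_max_depth_py; infer_instance

def pvWitness_calculate_max_depth_py : (List (String × List (String × List String))) :=
  [("a", [("depends_on", ["b"])]), ("b", [("depends_on", [])])]

def Spec_calculate_max_depth_py (graph : List (String × List (String × List String))) (out : Int) : Prop := out = calculate_max_depth_py_alt graph
instance (graph : List (String × List (String × List String))) (out : Int) : Decidable (Spec_calculate_max_depth_py graph out) := by unfold Spec_calculate_max_depth_py; infer_instance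

-- ===== CLAIM (what is proved, stated in full; the proofs are below) =====
def Claim_equal_calculate_max_depth_py : Prop := ∀ (graph : List (String × List (String × List String))), Dom_calculate_max_depth_py graph → Pre_calculate_max_depth_py graph → Spec_calculate_max_depth_py graph (calculate_max_depth_py graph)

-- ===== LEMMAS AND PROOFS =====

theorem pv_free_add_lt {graph : List (String × List (String × List String))}
    {p : List String} {c : String}
    (hc : c ∈ graph.map Prod.fst) (hv : c ∉ p) :
    pvFree graph (PySem.Set.add p c) < pvFree graph p := by
  unfold pvFree
  apply pv_len_filter_lt _ _ _ c hc
  · simp [PySem.Set.mem_add]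
  · simp [hv]
  · intro a _ ha
    simp only [Bool.not_eq_true', List.contains_eq_mem, decide_eq_false_iff_not,
      PySem.Set.mem_add, not_or] at ha ⊢
    exact ha.1


-- abstract per-state value: gD n c p = best simple-path length reachable from state (c, p)
-- (fuel-indexed; stable once n ≥ pvFree graph p)
def gD (graph : List (String × List (String × List String))) :
    Nat → String → List String → Int
  | 0, c, p => (((PySem.Set.add p c).length : Nat) : Int)
  | Nat.succ n, c, p =>
    let p' := PySem.Set.add p c
    match pvDeps graph c with
    | none => ((p'.length : Nat) : Int)
    | some ds =>
      (ds.filter (fun d => !(p'.contains d))).foldl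
        (fun b d => max b (gD graph n d p')) ((p'.length : Nat) : Int)

theorem gD_zero (graph : List (String × List (String × List String))) (c : String) (p : List String) :
    gD graph 0 c p = (((PySem.Set.add p c).length : Nat) : Int) := rfl

theorem gD_succ (graph : List (String × List (String × List String))) (n : Nat) (c : String) (p : List String) :
    gD graph (n + 1) c p =
      (match pvDeps graph c with
      | none => (((PySem.Set.add p c).length : Nat) : Int)
      | some ds =>
        (ds.filter (fun d => !((PySem.Set.add p c).contains d))).foldl
          (fun b d => max b (gD graph n d (PySem.Set.add p c)))
          (((PySem.Set.add p c).length : Nat) : Int)) := rfl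

theorem pv_add_length {p : List String} {c : String} (hc : c ∉ p) :
    (PySem.Set.add p c).length = p.length + 1 := by
  simp [PySem.Set.add, List.contains_eq_mem, hc]

theorem gD_ge (graph : List (String × List (String × List String)))
    (n : Nat) (c : String) (p : List String) :
    (((PySem.Set.add p c).length : Nat) : Int) ≤ gD graph n c p := by
  cases n with
  | zero => rw [gD_zero]
  | succ n =>
    rw [gD_succ]
    cases hq : pvDeps graph c with
    | none => exact le_refl _
    | some ds => exact (PySem.List.le_foldl_max_int _ _ _).1

-- helper foldl-max lemmas
theorem fm_pull {α : Type} (F : α → Int) (l : List α) (a b : Int) :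
    l.foldl (fun x d => max x (F d)) (max a b) = max a (l.foldl (fun x d => max x (F d)) b) := by
  induction l generalizing b with
  | nil => simp
  | cons x t ih => simp only [List.foldl_cons, max_assoc]; exact ih _

theorem fm_add {α : Type} (F : α → Int) (l : List α) (m a : Int) :
    m + l.foldl (fun x d => max x (F d)) a = l.foldl (fun x d => max x (m + F d)) (m + a) := by
  induction l generalizing a with
  | nil => simp
  | cons x t ih =>
    simp only [List.foldl_cons]
    rw [max_add_add_left]
    exact ih _

theorem fm_filter {α : Type} (F G : α → Int) (q : α → Bool) (l : List α) :
    ∀ (i : Int), (∀ d ∈ l, (q d = true → F d = G d) ∧ (q d = false → F d ≤ i)) →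
    l.foldl (fun x d => max x (F d)) i = (l.filter q).foldl (fun x d => max x (G d)) i := by
  induction l with
  | nil => intro i _; simp
  | cons x t ih =>
    intro i h
    have hx := h x (List.mem_cons_self ..)
    have ht : ∀ d ∈ t, (q d = true → F d = G d) ∧ (q d = false → F d ≤ max i (F x)) :=
      fun d hd => ⟨(h d (List.mem_cons_of_mem _ hd)).1,
        fun hqd => le_trans ((h d (List.mem_cons_of_mem _ hd)).2 hqd) (le_max_left _ _)⟩
    by_cases hq : q x = true
    · simp only [List.filter_cons, hq, if_true, List.foldl_cons, hx.1 hq]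
      apply ih
      rw [← hx.1 hq]; exact ht
    · simp only [Bool.not_eq_true] at hq
      have : max i (F x) = i := max_eq_left (hx.2 hq)
      simp only [List.filter_cons, hq, List.foldl_cons, this]
      apply ih
      intro d hd
      exact ⟨(h d (List.mem_cons_of_mem _ hd)).1,
        fun hqd => (h d (List.mem_cons_of_mem _ hd)).2 hqd⟩

theorem fm_last {α : Type} (F : α → Int) (l : List α) (i : Int) (x : α) :
    l.foldl (fun b d => max b (F d)) (max i (F x)) = max (l.foldl (fun b d => max b (F d)) i) (F x) := by
  rw [max_comm i (F x), fm_pull, max_comm]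

theorem fm_reverse {α : Type} (F : α → Int) (l : List α) (i : Int) :
    l.reverse.foldl (fun b d => max b (F d)) i = l.foldl (fun b d => max b (F d)) i := by
  induction l generalizing i with
  | nil => rfl
  | cons x t ih =>
    simp only [List.reverse_cons, List.foldl_append, List.foldl_cons, List.foldl_nil, ih]
    rw [← fm_last]

theorem maxChildA_eq_foldl (graph : List (String × List (String × List String)))
    (v : List String) (ds : List String) (acc : Int) :
    maxChildA graph v ds acc = ds.foldl (fun m d => max m (getDepthA graph v d)) acc := by
  induction ds generalizing acc with
  | nil => rw [maxChildA.eq_def]; rfl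
  | cons d rest ih => rw [maxChildA.eq_def]; simp only [List.foldl_cons]; exact ih _

theorem getDepthA_mem (graph : List (String × List (String × List String)))
    (V : List String) (c : String) (h : c ∈ V) : getDepthA graph V c = 0 := by
  rw [getDepthA.eq_def]; simp [h]

theorem getDepthA_some_nil (graph : List (String × List (String × List String)))
    (V : List String) (c : String)
    (hcV : c ∉ V) (hq : pvDeps graph c = some []) : getDepthA graph V c = 1 := by
  rw [getDepthA.eq_def]
  simp only [hcV, dite_false]
  split
  · rename_i h; rw [h] at hq; cases hq
  · rename_i ds' h
    rw [h] at hq; injection hq with e; subst e; rfl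

theorem getDepthA_some_cons (graph : List (String × List (String × List String)))
    (V : List String) (c : String) (d0 : String) (rest : List String)
    (hcV : c ∉ V) (hq : pvDeps graph c = some (d0 :: rest)) :
    getDepthA graph V c =
      1 + maxChildA graph (c :: V) rest (getDepthA graph (c :: V) d0) := by
  rw [getDepthA.eq_def]
  simp only [hcV, dite_false]
  split
  · rename_i h; rw [h] at hq; cases hq
  · rename_i ds' h
    rw [h] at hq; injection hq with e; subst e; rfl

-- Pre_ gives: every key has a depends_on list, all of whose members are keys
theorem pvDeps_of_key {graph : List (String × List (String × List String))} {c : String}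
    (hP : Pre_calculate_max_depth_py graph) (hc : c ∈ graph.map Prod.fst) :
    ∃ ds, pvDeps graph c = some ds ∧ ∀ d ∈ ds, d ∈ graph.map Prod.fst := by
  obtain ⟨pr, hpr, rfl⟩ := List.mem_map.mp hc
  have hex : ∃ x ∈ graph, (fun p => p.1 == pr.1) x = true := ⟨pr, hpr, by simp⟩
  obtain ⟨pr', hfind⟩ := Option.isSome_iff_exists.mp (List.find?_isSome.mpr hex)
  have hpr' := List.mem_of_find?_eq_some hfind
  have hfst : pr'.1 = pr.1 := by have := List.find?_some hfind; simpa using this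
  obtain ⟨hdep, hsub⟩ := hP pr' hpr'
  obtain ⟨q, hq, hqd⟩ := hdep
  have hex2 : ∃ x ∈ pr'.2, (fun p => p.1 == "depends_on") x = true := ⟨q, hq, by simp [hqd]⟩
  obtain ⟨q', hfind2⟩ := Option.isSome_iff_exists.mp (List.find?_isSome.mpr hex2)
  have hq' := List.mem_of_find?_eq_some hfind2
  have hq'd : q'.1 = "depends_on" := by have := List.find?_some hfind2; simpa using this
  refine ⟨q'.2, ?_, hsub q' hq' hq'd⟩
  unfold pvDeps pvLookup
  rw [hfind]
  show Option.map Prod.snd (pr'.2.find? (fun p => p.1 == "depends_on")) = some q'.2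
  rw [hfind2]
  rfl

theorem pv_ds_le_pvS {graph : List (String × List (String × List String))} {c : String}
    {ds : List String} (h : pvDeps graph c = some ds) : ds.length + 1 ≤ pvS graph := by
  unfold pvDeps pvLookup at h
  cases hf : graph.find? (fun p => p.1 == c) with
  | none => rw [hf] at h; simp at h
  | some pr =>
    rw [hf] at h
    have h2 : Option.map Prod.snd (pr.2.find? (fun p => p.1 == "depends_on")) = some ds := h
    cases hg : pr.2.find? (fun p => p.1 == "depends_on") with
    | none => rw [hg] at h2; simp at h2
    | some q =>
      rw [hg] at h2
      have hds : q.2 = ds := by simpa using h2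
      have hqmem := List.mem_of_find?_eq_some hg
      have hprmem := List.mem_of_find?_eq_some hf
      have h1 : ds.length ≤ (pr.2.map (fun q => q.2.length)).sum := by
        rw [← hds]
        exact List.single_le_sum (fun _ _ => Nat.zero_le _) _ (List.mem_map_of_mem hqmem)
      have h2 : (pr.2.map (fun q => q.2.length)).sum ≤
          (graph.map (fun p => (p.2.map (fun q => q.2.length)).sum)).sum :=
        List.single_le_sum (fun _ _ => Nat.zero_le _) _ (List.mem_map_of_mem hprmem)
      unfold pvS
      omega

theorem pv_free_pos {graph : List (String × List (String × List String))}
    {p : List String} {c : String}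
    (hc : c ∈ graph.map Prod.fst) (hcp : c ∉ p) : 1 ≤ pvFree graph p := by
  unfold pvFree
  have : c ∈ (graph.map Prod.fst).filter (fun k => !(p.contains k)) :=
    List.mem_filter.mpr ⟨hc, by simp [List.contains_eq_mem, hcp]⟩
  exact List.length_pos_of_mem this

-- stability: gD is independent of the fuel once it is at least pvFree graph p
theorem gD_stab {graph : List (String × List (String × List String))}
    (hP : Pre_calculate_max_depth_py graph) :
    ∀ (n : Nat) (c : String) (p : List String), c ∈ graph.map Prod.fst → c ∉ p →
      pvFree graph p ≤ n → gD graph (n + 1) c p = gD graph n c p := by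
  intro n
  induction n using Nat.strong_induction_on with
  | _ n ih =>
    intro c p hc hcp hfree
    cases n with
    | zero => exact absurd (le_trans (pv_free_pos hc hcp) hfree) (by omega)
    | succ m =>
      rw [gD_succ, gD_succ]
      cases hq : pvDeps graph c with
      | none => rfl
      | some ds =>
        simp only
        obtain ⟨ds', hq', hsub⟩ := pvDeps_of_key hP hc
        rw [hq] at hq'
        injection hq' with hds
        subst hds
        apply PySem.List.foldl_congr_mem
        intro acc d hd
        have hdd := List.mem_filter.mp hd
        have hdp' : d ∉ PySem.Set.add p c := by simpa using hdd.2
        have hdk : d ∈ graph.map Prod.fst := hsub d hdd.1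
        have hlt : pvFree graph (PySem.Set.add p c) < pvFree graph p := pv_free_add_lt hc hcp
        rw [ih m (by omega) d _ hdk hdp' (by omega)]

theorem gD_irrel {graph : List (String × List (String × List String))}
    (hP : Pre_calculate_max_depth_py graph) :
    ∀ (n : Nat) (c : String) (p : List String), c ∈ graph.map Prod.fst → c ∉ p →
      pvFree graph p ≤ n → gD graph n c p = gD graph (pvFree graph p) c p := by
  intro n
  induction n with
  | zero =>
    intro c p hc hcp hfree
    exact absurd (le_trans (pv_free_pos hc hcp) hfree) (by omega)
  | succ k ih =>
    intro c p hc hcp hfree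
    by_cases hk : pvFree graph p ≤ k
    · rw [gD_stab hP k c p hc hcp hk]; exact ih c p hc hcp hk
    · have : pvFree graph p = k + 1 := by omega
      rw [this]

-- bridge A ↔ gD: from a live state (c, path) the recursion's depth plus the path length is gD
theorem pv_LA {graph : List (String × List (String × List String))}
    (hP : Pre_calculate_max_depth_py graph) :
    ∀ (n : Nat) (V P : List String) (c : String), c ∈ graph.map Prod.fst → c ∉ P →
      (∀ x, x ∈ V ↔ x ∈ P) → V.length = P.length → pvFree graph P ≤ n →
      ((P.length : Nat) : Int) + getDepthA graph V c = gD graph n c P := by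
  intro n
  induction n using Nat.strong_induction_on with
  | _ n ih =>
    intro V P c hc hcP hVP hlen hfree
    cases n with
    | zero => exact absurd (le_trans (pv_free_pos hc hcP) hfree) (by omega)
    | succ m =>
      have hcV : c ∉ V := fun h => hcP ((hVP c).mp h)
      obtain ⟨ds, hq, hsub⟩ := pvDeps_of_key hP hc
      rw [gD_succ]
      simp only [hq]
      have hlenP' : (PySem.Set.add P c).length = P.length + 1 := pv_add_length hcP
      have hmemP' : ∀ x, x ∈ (c :: V) ↔ x ∈ PySem.Set.add P c := by
        intro x
        rw [PySem.Set.mem_add, List.mem_cons, or_comm, hVP x]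
      cases ds with
      | nil =>
        rw [getDepthA_some_nil graph V c hcV hq]
        simp only [List.filter_nil, List.foldl_nil]
        rw [hlenP']; push_cast; ring
      | cons d0 rest =>
        rw [getDepthA_some_cons graph V c d0 rest hcV hq]
        rw [maxChildA_eq_foldl]
        -- abbreviations
        set P' := PySem.Set.add P c with hP'
        set V' := c :: V with hV'
        have hlenV' : V'.length = P'.length := by simp [hV', hlenP', hlen]
        have hfree' : pvFree graph P' < pvFree graph P := pv_free_add_lt hc hcP
        have key : ∀ d ∈ d0 :: rest,
            ((¬ d ∈ P') → ((P'.length : Nat) : Int) + getDepthA graph V' d = gD graph m d P') ∧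
            (d ∈ P' → getDepthA graph V' d = 0) := by
          intro d hd
          constructor
          · intro hdP'
            exact ih m (by omega) V' P' d (hsub d hd) hdP'
              (fun x => hmemP' x) hlenV' (by omega)
          · intro hdP'
            exact getDepthA_mem graph V' d ((hmemP' d).mpr hdP')
        -- arithmetic shape: (|P|:Int) + (1 + fold) = (|P'|) + fold
        have hPP' : ((P.length : Nat) : Int) + 1 = ((P'.length : Nat) : Int) := by
          rw [hlenP']; push_cast; ring
        rw [show ((P.length : Nat) : Int) +
              (1 + List.foldl (fun m_1 d => max m_1 (getDepthA graph V' d)) (getDepthA graph V' d0) rest)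
            = ((P'.length : Nat) : Int) +
              List.foldl (fun m_1 d => max m_1 (getDepthA graph V' d)) (getDepthA graph V' d0) rest by
          rw [← hPP']; ring]
        rw [fm_add]
        -- init: |P'| + aA d0 = max |P'| (|P'| + aA d0)
        have hinit : ((P'.length : Nat) : Int) + getDepthA graph V' d0 =
            max ((P'.length : Nat) : Int) (((P'.length : Nat) : Int) + getDepthA graph V' d0) := by
          by_cases hd0 : d0 ∈ P'
          · rw [(key d0 (List.mem_cons_self ..)).2 hd0]; simp
          · have hKey := (key d0 (List.mem_cons_self ..)).1 hd0
            have hle : ((P'.length : Nat) : Int) ≤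
                ((P'.length : Nat) : Int) + getDepthA graph V' d0 := by
              rw [hKey]
              have hge := gD_ge graph m d0 P'
              have h1 : (P'.length : Nat) ≤ (PySem.Set.add P' d0).length := by
                rw [pv_add_length hd0]; omega
              calc ((P'.length : Nat) : Int) ≤ (((PySem.Set.add P' d0).length : Nat) : Int) := by
                    exact_mod_cast h1
                _ ≤ _ := hge
            exact (max_eq_right hle).symm
        rw [hinit]
        have hcons : List.foldl (fun x d => max x (((P'.length : Nat) : Int) + getDepthA graph V' d))
              (max ((P'.length : Nat) : Int) (((P'.length : Nat) : Int) + getDepthA graph V' d0)) rest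
            = List.foldl (fun x d => max x (((P'.length : Nat) : Int) + getDepthA graph V' d))
              (((P'.length : Nat) : Int)) (d0 :: rest) := rfl
        rw [hcons]
        -- now fm_filter over the whole list d0 :: rest with init |P'|
        rw [fm_filter (fun d => ((P'.length : Nat) : Int) + getDepthA graph V' d)
            (fun d => gD graph m d P') (fun d => !(P'.contains d)) (d0 :: rest)
            ((P'.length : Nat) : Int)]
        intro d hd
        constructor
        · intro hqd
          have hdP' : d ∉ P' := by simpa using hqd
          exact (key d hd).1 hdP'
        · intro hqd
          have hdP' : d ∈ P' := by simpa using hqd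
          rw [(key d hd).2 hdP']; simp

-- potential of a stack: enough fuel to drain it
def pvPhi (graph : List (String × List (String × List String)))
    (stack : List (String × List String)) : Nat :=
  (stack.map (fun it => (pvS graph + 1) ^ (pvFree graph it.2 + 1))).sum

theorem pv_loop {graph : List (String × List (String × List String))}
    (hP : Pre_calculate_max_depth_py graph) :
    ∀ (fuel : Nat) (stack : List (String × List String)) (best : Int),
      (∀ it ∈ stack, it.1 ∈ graph.map Prod.fst ∧ it.1 ∉ it.2) →
      pvPhi graph stack ≤ fuel →
      loopB graph fuel best stack =
        stack.foldl (fun b it => max b (gD graph (pvFree graph it.2) it.1 it.2)) best := by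
  intro fuel
  induction fuel with
  | zero =>
    intro stack best hInv hPhi
    cases stack with
    | nil => rfl
    | cons it rest =>
      exfalso
      have : 1 ≤ (pvS graph + 1) ^ (pvFree graph it.2 + 1) :=
        Nat.one_le_pow _ _ (by omega)
      unfold pvPhi at hPhi
      simp only [List.map_cons, List.sum_cons] at hPhi
      omega
  | succ f ih =>
    intro stack best hInv hPhi
    cases stack with
    | nil => rfl
    | cons it rest =>
      obtain ⟨c, p⟩ := it
      obtain ⟨hck, hcp⟩ := hInv (c, p) (List.mem_cons_self ..)
      obtain ⟨ds, hq, hsub⟩ := pvDeps_of_key hP hck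
      rw [loopB]
      simp only [hq]
      set P' := PySem.Set.add p c with hP'
      set children := (ds.filter (fun d => !(P'.contains d))).map (fun d => (d, P')) with hch
      have hInv' : ∀ it ∈ children ++ rest, it.1 ∈ graph.map Prod.fst ∧ it.1 ∉ it.2 := by
        intro it hit
        rcases List.mem_append.mp hit with hc1 | hc2
        · obtain ⟨d, hd, rfl⟩ := List.mem_map.mp hc1
          have hdd := List.mem_filter.mp hd
          refine ⟨hsub d hdd.1, ?_⟩
          show d ∉ P'
          simpa using hdd.2
        · exact hInv it (List.mem_cons_of_mem _ hc2)
      have hfreelt : pvFree graph P' < pvFree graph p := pv_free_add_lt hck hcp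
      -- potential bookkeeping
      have hPhi' : pvPhi graph (children ++ rest) ≤ f := by
        unfold pvPhi at hPhi ⊢
        rw [List.map_append, List.sum_append]
        have hchild : (children.map (fun it => (pvS graph + 1) ^ (pvFree graph it.2 + 1))).sum
            = children.length * (pvS graph + 1) ^ (pvFree graph P' + 1) := by
          rw [hch, List.map_map]
          have hmem : ∀ x ∈ ((ds.filter (fun d => !(P'.contains d))).map
              ((fun it => (pvS graph + 1) ^ (pvFree graph it.2 + 1)) ∘ (fun d => (d, P')))),
              x = (pvS graph + 1) ^ (pvFree graph P' + 1) := by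
            intro x hx
            obtain ⟨d, _, rfl⟩ := List.mem_map.mp hx
            rfl
          rw [List.eq_replicate_of_mem hmem, List.sum_replicate, smul_eq_mul]
          simp
        have hcl : children.length ≤ ds.length := by
          rw [hch, List.length_map]; exact List.length_filter_le _ _
        have hdsS : ds.length + 1 ≤ pvS graph := pv_ds_le_pvS hq
        have hpow : (pvS graph + 1) ^ (pvFree graph P' + 1) ≤ (pvS graph + 1) ^ (pvFree graph p) :=
          Nat.pow_le_pow_right (by omega) (by omega)
        have hw : children.length * (pvS graph + 1) ^ (pvFree graph P' + 1) + 1 ≤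
            (pvS graph + 1) ^ (pvFree graph p + 1) := by
          calc children.length * (pvS graph + 1) ^ (pvFree graph P' + 1) + 1
              ≤ ds.length * (pvS graph + 1) ^ (pvFree graph p) + 1 :=
                Nat.add_le_add_right (Nat.mul_le_mul hcl hpow) 1
            _ ≤ (pvS graph + 1) ^ (pvFree graph p) * (pvS graph + 1) := by
                have h1 : 1 ≤ (pvS graph + 1) ^ (pvFree graph p) := Nat.one_le_pow _ _ (by omega)
                calc ds.length * (pvS graph + 1) ^ (pvFree graph p) + 1
                    ≤ ds.length * (pvS graph + 1) ^ (pvFree graph p) +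
                        (pvS graph + 1) ^ (pvFree graph p) := by omega
                  _ = (pvS graph + 1) ^ (pvFree graph p) * (ds.length + 1) := by ring
                  _ ≤ (pvS graph + 1) ^ (pvFree graph p) * (pvS graph + 1) :=
                      Nat.mul_le_mul_left _ (by omega)
            _ = (pvS graph + 1) ^ (pvFree graph p + 1) := by rw [pow_succ]
        simp only [List.map_cons, List.sum_cons] at hPhi
        rw [hchild]
        omega
      rw [ih _ _ hInv' hPhi']
      rw [List.foldl_append]
      -- children fold = max best (gD (pvFree p) c p)
      simp only [List.foldl_cons]
      congr 1
      rw [hch, List.foldl_map]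
      -- unfold gD at pvFree p = m+1
      obtain ⟨m, hm⟩ : ∃ m, pvFree graph p = m + 1 := by
        have := pv_free_pos hck hcp
        exact ⟨pvFree graph p - 1, by omega⟩
      rw [hm, gD_succ]
      simp only [hq]
      rw [← hP']
      have hcongr : List.foldl (fun b d => max b (gD graph m d P'))
            (((P'.length : Nat) : Int)) (ds.filter (fun d => !(P'.contains d))) =
          List.foldl (fun b d => max b (gD graph (pvFree graph P') d P'))
            (((P'.length : Nat) : Int)) (ds.filter (fun d => !(P'.contains d))) := by
        apply PySem.List.foldl_congr_mem
        intro acc d hd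
        have hdd := List.mem_filter.mp hd
        have hdP' : d ∉ P' := by simpa using hdd.2
        rw [gD_irrel hP m d P' (hsub d hdd.1) hdP' (by omega)]
      rw [hcongr]
      rw [show (max best ((P'.length : Nat) : Int)) = max best (((P'.length : Nat) : Int)) from rfl]
      rw [fm_pull (fun d => gD graph (pvFree graph P') d P')]

theorem pv_free_nil (graph : List (String × List (String × List String))) :
    pvFree graph ([] : List String) = graph.length := by
  simp [pvFree]

-- B's loop, started on the seeded stack, computes the running max of getDepthA over the keys
theorem pv_alt_eq {graph : List (String × List (String × List String))}
    (hPre : Pre_calculate_max_depth_py graph) :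
    calculate_max_depth_py_alt graph =
      (graph.map Prod.fst).foldl (fun b k => max b (getDepthA graph [] k)) 0 := by
  unfold calculate_max_depth_py_alt
  have hInv : ∀ it ∈ (graph.map (fun p => (p.1, ([] : List String)))).reverse,
      it.1 ∈ graph.map Prod.fst ∧ it.1 ∉ it.2 := by
    intro it hit
    rw [List.mem_reverse] at hit
    obtain ⟨p, hp, rfl⟩ := List.mem_map.mp hit
    exact ⟨List.mem_map_of_mem hp, by simp⟩
  have hPhi : pvPhi graph ((graph.map (fun p => (p.1, ([] : List String)))).reverse) ≤ pvFuel graph := by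
    unfold pvPhi pvFuel
    have hmem : ∀ x ∈ ((graph.map (fun p => (p.1, ([] : List String)))).reverse.map
        (fun it => (pvS graph + 1) ^ (pvFree graph it.2 + 1))),
        x = (pvS graph + 1) ^ (graph.length + 1) := by
      intro x hx
      obtain ⟨it, hit, rfl⟩ := List.mem_map.mp hx
      rw [List.mem_reverse] at hit
      obtain ⟨p, hp, rfl⟩ := List.mem_map.mp hit
      rw [pv_free_nil]
    rw [List.eq_replicate_of_mem hmem, List.sum_replicate, smul_eq_mul]
    simp
  rw [pv_loop hPre _ _ _ hInv hPhi]
  simp only [fm_reverse]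
  rw [List.foldl_map, List.foldl_map]
  apply PySem.List.foldl_congr_mem
  intro acc p hp
  have hk : p.1 ∈ graph.map Prod.fst := List.mem_map_of_mem hp
  have hLA := pv_LA hPre (pvFree graph ([] : List String)) [] [] p.1 hk
    (by simp) (by simp) rfl (le_refl _)
  simp only [List.length_nil, Nat.cast_zero, zero_add] at hLA
  rw [← hLA]

theorem pv_getDepthA_pos {graph : List (String × List (String × List String))}
    (hPre : Pre_calculate_max_depth_py graph) {k : String} (hk : k ∈ graph.map Prod.fst) :
    (1 : Int) ≤ getDepthA graph [] k := by
  have hLA := pv_LA hPre (pvFree graph ([] : List String)) [] [] k hk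
    (by simp) (by simp) rfl (le_refl _)
  simp only [List.length_nil, Nat.cast_zero, zero_add] at hLA
  have hge := gD_ge graph (pvFree graph ([] : List String)) k []
  rw [← hLA] at hge
  simpa [PySem.Set.add] using hge

-- ===== VERDICT (by name: the statement is the Claim_ definition above) =====
theorem calculate_max_depth_py_spec : Claim_equal_calculate_max_depth_py := by
  intro graph _hDom hPre
  unfold Spec_calculate_max_depth_py
  rw [pv_alt_eq hPre]
  cases graph with
  | nil => rfl
  | cons g0 gt =>
    unfold calculate_max_depth_py
    simp only [List.isEmpty_cons, Bool.false_eq_true, if_false, List.map_cons]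
    rw [PySem.List.max?_id_cons]
    rw [List.foldl_map]
    simp only [List.foldl_cons]
    have hk : g0.1 ∈ (g0 :: gt).map Prod.fst := by simp
    have h1 := pv_getDepthA_pos hPre hk
    rw [max_eq_right (le_trans zero_le_one h1)]
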